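-- pv_equiv track=rewrite | github.com/YevhenTs/python_pro_lessons_aug2022 | PP_l7.1.py | geo_prog_gen
-- ===== SOURCE A (Python) =====
-- def geo_prog_gen(n):
--     first_number = 1
--     second_number = 2
--     index = 1
--     while index <= n:
--         next_number = first_number * second_number
--         first_number = next_number
--         index = index + 1
--         yield next_number
--     return
-- ===== SOURCE B (Python) =====
-- def geo_prog_gen(n):
--     for i in range(1, n + 1):
--         yield 1 << i
-- ===== Notes on version B (the rewrite author's own statement) =====
-- stated objective: simpler
-- what changed: Replaces the while-loop carrying a running product (first_number *= 2 each step) with a for-loop over range(1, n+1) computing each term in closed form as 1 << i, eliminating the carried accumulator state.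
import Mathlib
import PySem

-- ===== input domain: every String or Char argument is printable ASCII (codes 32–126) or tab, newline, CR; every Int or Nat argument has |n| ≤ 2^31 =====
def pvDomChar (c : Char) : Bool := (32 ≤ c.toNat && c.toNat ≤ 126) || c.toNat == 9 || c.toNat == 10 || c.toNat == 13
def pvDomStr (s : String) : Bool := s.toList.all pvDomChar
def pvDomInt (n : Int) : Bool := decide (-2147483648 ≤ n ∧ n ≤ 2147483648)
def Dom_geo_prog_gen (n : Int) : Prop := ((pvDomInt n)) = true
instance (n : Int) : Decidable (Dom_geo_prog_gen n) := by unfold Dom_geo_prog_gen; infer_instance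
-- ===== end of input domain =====

-- B replaces A's carried running-product accumulator with a closed-form 2**i per loop index (simpler).


-- ===== PORT A =====
-- while index <= n: next = first * second; first = next; index += 1; yield next
-- (second_number stays 2 throughout; the loop runs exactly max(n,0) times, so fuel n.toNat
--  bounds it; yields are accumulated tail-recursively and reversed at the end)
def geoLoopA (n : Int) (first second index : Int) (fuel : Nat) (acc : List Int) : List Int :=
  match fuel with
  | 0 => acc.reverse
  | f + 1 =>
    if index ≤ n then
      let next := first * second
      geoLoopA n next second (index + 1) f (next :: acc)
    else acc.reverse

def geo_prog_gen (n : Int) : List Int :=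
  geoLoopA n 1 2 1 n.toNat []

-- ===== PORT B =====
-- for i in range(1, n+1): yield 1 << i   (a left shift of 1 by i ≥ 0 is exactly 2^i; ported as 2 ^ i.toNat)
def geo_prog_gen_alt (n : Int) : List Int :=
  (PySem.List.pyRange 1 (n + 1) 1).map (fun i => 2 ^ i.toNat)

-- ===== PRECONDITION & SPEC =====
def Spec_geo_prog_gen (n : Int) (out : List Int) : Prop := out = geo_prog_gen_alt n
instance (n : Int) (out : List Int) : Decidable (Spec_geo_prog_gen n out) := by unfold Spec_geo_prog_gen; infer_instance

-- ===== CLAIM (what is proved, stated in full; the proofs are below) =====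
def Claim_equal_geo_prog_gen : Prop := ∀ (n : Int), Dom_geo_prog_gen n → Spec_geo_prog_gen n (geo_prog_gen n)

-- ===== LEMMAS AND PROOFS =====

-- Loop invariant: entering an iteration with first = 2^(index-1), the loop appends
-- exactly the powers 2^index, …, 2^n (i.e. 2^i for i in range(index, n+1)) to the yields.
theorem geoLoopA_eq (fuel : Nat) (n index : Int) (acc : List Int) (h1 : 1 ≤ index)
    (hf : (n - index + 1).toNat ≤ fuel) :
    geoLoopA n (2 ^ (index - 1).toNat) 2 index fuel acc
      = acc.reverse ++ (PySem.List.pyRange index (n + 1) 1).map (fun i => 2 ^ i.toNat) := by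
  induction fuel generalizing index acc with
  | zero =>
    have : (n + 1 - index).toNat = 0 := by omega
    simp [geoLoopA, PySem.List.pyRange_one, this]
  | succ f ih =>
    by_cases h : index ≤ n
    · rw [PySem.List.pyRange_one_cons (by omega : index < n + 1)]
      have hnext : (2 : Int) ^ (index - 1).toNat * 2 = 2 ^ ((index + 1) - 1).toNat := by
        have : ((index + 1) - 1).toNat = (index - 1).toNat + 1 := by omega
        rw [this, pow_succ]
      simp only [geoLoopA, if_pos h]
      rw [hnext, ih (index + 1) _ (by omega) (by omega)]
      simp
    · have : (n + 1 - index).toNat = 0 := by omega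
      simp [geoLoopA, PySem.List.pyRange_one, this, h]

-- ===== VERDICT (by name: the statement is the Claim_ definition above) =====
theorem geo_prog_gen_spec : Claim_equal_geo_prog_gen := by
  intro n _
  show geo_prog_gen n = geo_prog_gen_alt n
  unfold geo_prog_gen geo_prog_gen_alt
  have := geoLoopA_eq n.toNat n 1 [] le_rfl (by omega)
  simpa using this
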